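-- pv_equiv track=rewrite | github.com/xf-main/OpenViking | openviking/service/reindex_executor.py | _parse_overview_md
-- ===== SOURCE A (Python) =====
-- from typing import Any, Iterable, Optional
--
-- def _parse_overview_md(content: str) -> dict[str, str]:
--     parsed: dict[str, str] = {}
--     current_name: Optional[str] = None
--     current_lines: list[str] = []
--     for line in (content or "").splitlines():
--         if line.startswith("## "):
--             if current_name is not None:
--                 parsed[current_name] = "\n".join(current_lines).strip()
--             current_name = line[3:].strip()
--             current_lines = []
--             continue
--         if current_name is not None:
--             current_lines.append(line)
--     if current_name is not None:
--         parsed[current_name] = "\n".join(current_lines).strip()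
--     return parsed
-- ===== SOURCE B (Python) =====
-- def _parse_overview_md(content: str) -> dict[str, str]:
--     def split_at_heading(ls):
--         for k, l in enumerate(ls):
--             if l.startswith("## "):
--                 return ls[:k], ls[k:]
--         return ls, []
--
--     _, rest = split_at_heading((content or "").splitlines())
--     parsed: dict[str, str] = {}
--     while rest:
--         body, rest2 = split_at_heading(rest[1:])
--         parsed[rest[0][3:].strip()] = "\n".join(body).strip()
--         rest = rest2
--     return parsed
-- ===== Notes on version B (the rewrite author's own statement) =====
-- stated objective: alternative
-- what changed: Replaced A's single-pass accumulator (current_name/current_lines with flush-on-next-heading) by an outer loop over sections that repeatedly splits the remaining lines at the next '## ' heading and slices out each body.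
import Mathlib
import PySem

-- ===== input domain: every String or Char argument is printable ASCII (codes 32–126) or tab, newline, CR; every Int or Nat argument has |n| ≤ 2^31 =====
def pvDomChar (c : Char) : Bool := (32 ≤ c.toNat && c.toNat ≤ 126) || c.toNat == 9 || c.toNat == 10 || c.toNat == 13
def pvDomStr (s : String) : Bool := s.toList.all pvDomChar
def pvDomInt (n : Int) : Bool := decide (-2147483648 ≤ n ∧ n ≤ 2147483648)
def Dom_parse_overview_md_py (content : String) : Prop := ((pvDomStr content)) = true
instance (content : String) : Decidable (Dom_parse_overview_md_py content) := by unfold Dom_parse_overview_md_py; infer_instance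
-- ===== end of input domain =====

-- B replaces A's single-pass accumulator by an outer loop over sections, splitting the
-- remaining lines at the next '## ' heading (different decomposition, same cost).

-- ===== PORT A =====
-- A's for-loop over splitlines carrying (parsed, current_name, current_lines), plus the final flush.
-- '(content or "")' coincides with 'content' here since "".splitlines() == [].
def pvALoop : List String → PySem.Dict String String → Option String → List String → PySem.Dict String String
  | [], parsed, curName, curLines =>
      match curName with
      | some n => parsed.insert n (PySem.Str.strip (PySem.Str.join "\n" curLines))
      | none => parsed
  | line :: rest, parsed, curName, curLines =>
      if PySem.Str.startswith line "## " then
        let parsed' :=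
          match curName with
          | some n => parsed.insert n (PySem.Str.strip (PySem.Str.join "\n" curLines))
          | none => parsed
        pvALoop rest parsed' (some (PySem.Str.strip (PySem.Str.slice line (some 3) none))) []
      else
        match curName with
        | some _ => pvALoop rest parsed curName (curLines ++ [line])
        | none => pvALoop rest parsed curName curLines

def parse_overview_md_py (content : String) : List (String × String) :=
  (pvALoop (PySem.Str.splitlines content) PySem.Dict.empty none []).items

-- ===== PORT B =====
-- split_at_heading: scan for the first '## ' line, return (prefix, suffix-from-heading).
def pvSplitHead : List String → List String × List String
  | [] => ([], [])
  | l :: ls =>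
      if PySem.Str.startswith l "## " then ([], l :: ls)
      else
        let p := pvSplitHead ls
        (l :: p.1, p.2)

theorem pvSplitHead_snd_len_le (ls : List String) : (pvSplitHead ls).2.length ≤ ls.length := by
  induction ls with
  | nil => simp [pvSplitHead]
  | cons l ls ih =>
      simp only [pvSplitHead]
      split
      · simp
      · simpa using Nat.le_succ_of_le ih

-- B's while-loop over 'rest' (which always begins at a heading line).
def pvBLoop : PySem.Dict String String → List String → PySem.Dict String String
  | parsed, [] => parsed
  | parsed, h :: tl =>
      let p := pvSplitHead tl
      pvBLoop (parsed.insert (PySem.Str.strip (PySem.Str.slice h (some 3) none))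
                (PySem.Str.strip (PySem.Str.join "\n" p.1))) p.2
  termination_by _ rest => rest.length
  decreasing_by
    simpa using Nat.lt_succ_of_le (pvSplitHead_snd_len_le tl)

def parse_overview_md_py_alt (content : String) : List (String × String) :=
  (pvBLoop PySem.Dict.empty (pvSplitHead (PySem.Str.splitlines content)).2).items

-- ===== PRECONDITION & SPEC =====
def Spec_parse_overview_md_py (content : String) (out : List (String × String)) : Prop := out = parse_overview_md_py_alt content
instance (content : String) (out : List (String × String)) : Decidable (Spec_parse_overview_md_py content out) := by unfold Spec_parse_overview_md_py; infer_instance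

-- ===== CLAIM (what is proved, stated in full; the proofs are below) =====
def Claim_equal_parse_overview_md_py : Prop := ∀ (content : String), Dom_parse_overview_md_py content → Spec_parse_overview_md_py content (parse_overview_md_py content)

-- ===== LEMMAS AND PROOFS =====

-- While a section is open (curName = some n), A keeps accumulating exactly the lines
-- pvSplitHead takes before the next heading, then flushes.
theorem pvALoop_some (ls : List String) :
    ∀ (d : PySem.Dict String String) (n : String) (acc : List String),
      pvALoop ls d (some n) acc =
        pvBLoop (d.insert n (PySem.Str.strip (PySem.Str.join "\n" (acc ++ (pvSplitHead ls).1))))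
          (pvSplitHead ls).2 := by
  induction ls with
  | nil => intro d n acc; simp [pvALoop, pvSplitHead, pvBLoop]
  | cons l ls ih =>
      intro d n acc
      by_cases h : PySem.Chars.startswith l.toList ['#', '#', ' '] = true
      · simp [pvALoop, pvSplitHead, pvBLoop, h, ih]
      · simp [pvALoop, pvSplitHead, h, ih]

theorem pvALoop_none (ls : List String) :
    ∀ (d : PySem.Dict String String),
      pvALoop ls d none [] = pvBLoop d (pvSplitHead ls).2 := by
  induction ls with
  | nil => intro d; simp [pvALoop, pvSplitHead, pvBLoop]
  | cons l ls ih =>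
      intro d
      by_cases h : PySem.Chars.startswith l.toList ['#', '#', ' '] = true
      · simp [pvALoop, pvSplitHead, pvBLoop, h, pvALoop_some]
      · simp [pvALoop, pvSplitHead, h, ih]

-- ===== VERDICT (by name: the statement is the Claim_ definition above) =====
theorem parse_overview_md_py_spec : Claim_equal_parse_overview_md_py := by
  intro content _
  unfold Spec_parse_overview_md_py parse_overview_md_py parse_overview_md_py_alt
  rw [pvALoop_none]
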